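-- pv_equiv track=rewrite | github.com/psharifa/python_learning | lists/col_max_min_sum.py | print_max_min_sum_for_row_wise
-- ===== SOURCE A (Python) =====
-- def print_max_min_sum_for_row_wise(num_list):
--     max_list=[]
--     min_list=[]
--     sum_list=[]
--     for i in num_list:
--         mx=max(i)
--         max_list.append(mx)
--         mn=min(i)
--         min_list.append(mn)
--         sm=sum(i)
--         sum_list.append(sm)
--     return max_list,min_list,sum_list
-- ===== SOURCE B (Python) =====
-- def print_max_min_sum_for_row_wise(num_list):
--     # one fused pass per row (seed from the first element), then unzip the triples
--     triples = []
--     for row in num_list: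
--         mx = mn = sm = row[0]
--         for e in row[1:]:
--             if e > mx:
--                 mx = e
--             if e < mn:
--                 mn = e
--             sm += e
--         triples.append((mx, mn, sm))
--     max_list = [t[0] for t in triples]
--     min_list = [t[1] for t in triples]
--     sum_list = [t[2] for t in triples]
--     return max_list, min_list, sum_list
-- ===== Notes on version B (the rewrite author's own statement) =====
-- stated objective: alternative
-- what changed: Each row is reduced in one fused pass (running max/min/sum seeded from the first element) collected as triples and then unzipped, instead of three separate library scans (max, min, sum) per row appended to three lists.
import Mathlib
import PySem

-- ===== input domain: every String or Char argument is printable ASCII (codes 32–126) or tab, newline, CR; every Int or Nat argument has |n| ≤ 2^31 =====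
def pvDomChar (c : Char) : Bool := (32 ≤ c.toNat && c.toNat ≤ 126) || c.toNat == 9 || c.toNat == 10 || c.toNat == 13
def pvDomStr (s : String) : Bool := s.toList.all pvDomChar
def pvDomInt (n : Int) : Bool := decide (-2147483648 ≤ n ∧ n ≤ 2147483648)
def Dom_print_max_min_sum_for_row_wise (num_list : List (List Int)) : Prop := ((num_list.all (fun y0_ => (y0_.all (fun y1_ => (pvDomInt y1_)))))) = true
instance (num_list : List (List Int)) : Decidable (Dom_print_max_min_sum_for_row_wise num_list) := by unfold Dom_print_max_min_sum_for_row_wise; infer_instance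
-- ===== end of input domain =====

-- B fuses max/min/sum into one pass per row (triples, then unzip) instead of A's three library scans per row; same cost.
-- On an empty row both programs raise (A: ValueError from max([]); B: IndexError from row[0]) — excluded by Pre_.

-- ===== PORT A =====
def print_max_min_sum_for_row_wise (num_list : List (List Int)) : List Int × List Int × List Int :=
  let st := num_list.foldl (fun (acc : List Int × List Int × List Int) i =>
    let mx := (PySem.List.max? i (fun y => y)).getD 0   -- max(i); none (ValueError) only on an empty row, excluded by Pre_
    let max_list := acc.1 ++ [mx]
    let mn := (PySem.List.min? i (fun y => y)).getD 0   -- min(i)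
    let min_list := acc.2.1 ++ [mn]
    let sm := i.sum                                      -- sum(i)
    let sum_list := acc.2.2 ++ [sm]
    (max_list, min_list, sum_list)) ([], [], [])
  st

-- ===== PORT B =====
-- one fused pass over the row, seeded from its first element
def pvRowTriple (row : List Int) : Int × Int × Int :=
  let seed := (row.headD 0, row.headD 0, row.headD 0)   -- row[0]; empty row excluded by Pre_
  row.tail.foldl (fun (t : Int × Int × Int) e =>
    (if e > t.1 then e else t.1, if e < t.2.1 then e else t.2.1, t.2.2 + e)) seed

def print_max_min_sum_for_row_wise_alt (num_list : List (List Int)) : List Int × List Int × List Int :=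
  let triples := num_list.map pvRowTriple
  (triples.map (·.1), triples.map (·.2.1), triples.map (·.2.2))

-- ===== PRECONDITION & SPEC =====
-- Pre_ excludes inputs containing an empty row: there A raises ValueError (max of empty sequence), so A returns on exactly Pre_.
def Pre_print_max_min_sum_for_row_wise (num_list : List (List Int)) : Prop :=
  ∀ row ∈ num_list, row ≠ []
instance (num_list : List (List Int)) : Decidable (Pre_print_max_min_sum_for_row_wise num_list) := by
  unfold Pre_print_max_min_sum_for_row_wise; infer_instance

def pvWitness_print_max_min_sum_for_row_wise : List (List Int) := [[3, 1, 2], [-5], [0, 0]]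

def Spec_print_max_min_sum_for_row_wise (num_list : List (List Int)) (out : List Int × List Int × List Int) : Prop := out = print_max_min_sum_for_row_wise_alt num_list
instance (num_list : List (List Int)) (out : List Int × List Int × List Int) : Decidable (Spec_print_max_min_sum_for_row_wise num_list out) := by unfold Spec_print_max_min_sum_for_row_wise; infer_instance

-- ===== CLAIM (what is proved, stated in full; the proofs are below) =====
def Claim_equal_print_max_min_sum_for_row_wise : Prop := ∀ (num_list : List (List Int)), Dom_print_max_min_sum_for_row_wise num_list → Pre_print_max_min_sum_for_row_wise num_list → Spec_print_max_min_sum_for_row_wise num_list (print_max_min_sum_for_row_wise num_list)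

-- ===== LEMMAS AND PROOFS =====

-- the fused fold computes (running max, running min, seed + sum)
theorem pvRowFold (t : List Int) (mx mn sm : Int) :
    t.foldl (fun (p : Int × Int × Int) e =>
      (if e > p.1 then e else p.1, if e < p.2.1 then e else p.2.1, p.2.2 + e)) (mx, mn, sm)
      = (t.foldl max mx, t.foldl min mn, sm + t.sum) := by
  induction t generalizing mx mn sm with
  | nil => simp
  | cons e t ih =>
    simp only [List.foldl_cons, List.sum_cons, ih]
    have h1 : (if e > mx then e else mx) = max mx e := by rw [max_def]; split_ifs <;> omega
    have h2 : (if e < mn then e else mn) = min mn e := by rw [min_def]; split_ifs <;> omega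
    simp [h1, h2, add_assoc]

theorem pvRowTriple_cons (x : Int) (t : List Int) :
    pvRowTriple (x :: t) = (t.foldl max x, t.foldl min x, x + t.sum) := by
  simp [pvRowTriple, pvRowFold]

-- the accumulator-append loop of A equals B's map-then-unzip, generalized over the accumulators
theorem pvMainFold (rows : List (List Int)) (h : ∀ r ∈ rows, r ≠ []) (ma mi su : List Int) :
    rows.foldl (fun (acc : List Int × List Int × List Int) i =>
      (acc.1 ++ [(PySem.List.max? i (fun y => y)).getD 0],
       acc.2.1 ++ [(PySem.List.min? i (fun y => y)).getD 0],
       acc.2.2 ++ [i.sum])) (ma, mi, su)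
    = (ma ++ (rows.map pvRowTriple).map (·.1),
       mi ++ (rows.map pvRowTriple).map (·.2.1),
       su ++ (rows.map pvRowTriple).map (·.2.2)) := by
  induction rows generalizing ma mi su with
  | nil => simp
  | cons r rows ih =>
    obtain ⟨x, t, rfl⟩ : ∃ x t, r = x :: t := by
      cases r with
      | nil => exact absurd rfl (h _ (List.mem_cons_self ..))
      | cons x t => exact ⟨x, t, rfl⟩
    simp only [List.foldl_cons, List.map_cons]
    rw [ih (fun r hr => h r (List.mem_cons_of_mem _ hr))]
    simp [PySem.List.max?_id_cons, PySem.List.min?_id_cons, pvRowTriple_cons]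

-- ===== VERDICT (by name: the statement is the Claim_ definition above) =====
theorem print_max_min_sum_for_row_wise_spec : Claim_equal_print_max_min_sum_for_row_wise := by
  intro num_list _ hpre
  show _ = _
  simp only [print_max_min_sum_for_row_wise, print_max_min_sum_for_row_wise_alt]
  rw [pvMainFold num_list hpre]
  simp
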